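-- pv_equiv track=rewrite | github.com/finalcut/advent_of_code_2023 | day01/part2.py | getNumberFromReversedString
-- ===== SOURCE A (Python) =====
-- numbers = {
--  "zero": "0",
--  "one": "1",
--  "two": "2",
--  "three": "3",
--  "four": "4",
--  "five": "5",
--  "six": "6",
--  "seven": "7",
--  "eight": "8",
--  "nine": "9"
-- }
--
-- def getNumberFromReversedString(str):
--   rstr = ''.join(reversed(str))
--   index = len(str)
--   num = ""
--
--   for key, value in numbers.items():
--     rkey = ''.join(reversed(key))
--     if rkey in rstr:
--       tempindex = rstr.index(rkey)
--       if tempindex < index: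
--         index = tempindex
--         num = value
--     if value in rstr:
--       tempindex = rstr.index(value)
--       if tempindex < index:
--         index = tempindex
--         num = value
--
--   return num
-- ===== SOURCE B (Python) =====
-- numbers = {
--  "zero": "0",
--  "one": "1",
--  "two": "2",
--  "three": "3",
--  "four": "4",
--  "five": "5",
--  "six": "6",
--  "seven": "7",
--  "eight": "8",
--  "nine": "9"
-- }
--
-- def getNumberFromReversedString(str):
--   # scan end positions right-to-left; return value of the first (rightmost) match
--   for e in range(len(str) - 1, -1, -1):
--     c = str[e]
--     for key, value in numbers.items():
--       if c == value:
--         return value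
--       s = e - len(key) + 1
--       if s >= 0 and str[s:e + 1] == key:
--         return value
--   return ""
-- ===== Notes on version B (the rewrite author's own statement) =====
-- stated objective: alternative
-- what changed: Instead of reversing the string and taking, over all 20 keys, the minimum first-occurrence index found by repeated substring searches, B scans end positions right-to-left once and returns on the first position where a digit or number word ends, with no string reversal and early exit.
import Mathlib
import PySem

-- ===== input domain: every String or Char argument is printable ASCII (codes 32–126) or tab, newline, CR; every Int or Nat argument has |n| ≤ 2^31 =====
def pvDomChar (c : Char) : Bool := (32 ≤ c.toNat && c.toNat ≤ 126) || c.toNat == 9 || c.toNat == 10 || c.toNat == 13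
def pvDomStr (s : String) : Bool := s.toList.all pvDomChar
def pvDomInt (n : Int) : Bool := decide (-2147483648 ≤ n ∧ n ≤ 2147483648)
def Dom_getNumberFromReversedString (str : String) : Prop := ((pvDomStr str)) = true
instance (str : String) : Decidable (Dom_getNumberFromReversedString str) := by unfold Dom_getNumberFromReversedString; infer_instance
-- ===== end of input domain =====

-- B replaces A's "reverse the string and minimise 20 first-occurrence search indices" by a single
-- right-to-left sweep over end positions that returns at the first (rightmost) digit/word match.

-- the module constant `numbers` (dict, as its insertion-ordered item list)
def pvNumbers : List (List Char × List Char) :=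
  [(['z','e','r','o'], ['0']), (['o','n','e'], ['1']), (['t','w','o'], ['2']),
   (['t','h','r','e','e'], ['3']), (['f','o','u','r'], ['4']), (['f','i','v','e'], ['5']),
   (['s','i','x'], ['6']), (['s','e','v','e','n'], ['7']), (['e','i','g','h','t'], ['8']),
   (['n','i','n','e'], ['9'])]

-- ===== PORT A =====
-- loop body for one (key, value) item: try reversed key, then the digit, keeping the smaller index
def pvBodyA (rstr : List Char) (st : Int × List Char) (kv : List Char × List Char) : Int × List Char :=
  let rkey := kv.1.reverse
  let st1 := if PySem.Chars.isIn rkey rstr then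
      let t := PySem.Chars.find rstr rkey
      if t < st.1 then (t, kv.2) else st
    else st
  if PySem.Chars.isIn kv.2 rstr then
    let t := PySem.Chars.find rstr kv.2
    if t < st1.1 then (t, kv.2) else st1
  else st1

def getNumberFromReversedString (str : String) : String :=
  let l := str.toList
  let rstr := l.reverse
  let res := pvNumbers.foldl (pvBodyA rstr) ((l.length : Int), [])
  String.ofList res.2

-- ===== PORT B =====
-- inner loop body at end position e: str[e] == value, or str[s:e+1] == key with s = e-len(key)+1 >= 0
-- (str[e]: e < len str at every call site, so getD's default is never read)
def pvCheckPair (l : List Char) (e : Nat) (kv : List Char × List Char) : Option (List Char) :=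
  let c := l.getD e ' '
  if [c] = kv.2 then some kv.2
  else
    let s : Int := (e : Int) - kv.1.length + 1
    if 0 ≤ s ∧ PySem.List.slice l (some s) (some ((e : Int) + 1)) = kv.1 then some kv.2
    else none

-- the inner `for key, value in numbers.items(): … return …` loop
def pvCheckAt (l : List Char) (e : Nat) : Option (List Char) :=
  pvNumbers.findSome? (pvCheckPair l e)

-- `for e in range(len(str)-1, -1, -1)`: argument m scans e = m-1, m-2, …, 0
def pvScan (l : List Char) : Nat → List Char
  | 0 => []
  | e + 1 =>
    match pvCheckAt l e with
    | some v => v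
    | none => pvScan l e

def getNumberFromReversedString_alt (str : String) : String :=
  String.ofList (pvScan str.toList str.toList.length)

-- ===== PRECONDITION & SPEC =====
def Spec_getNumberFromReversedString (str : String) (out : String) : Prop := out = getNumberFromReversedString_alt str
instance (str : String) (out : String) : Decidable (Spec_getNumberFromReversedString str out) := by unfold Spec_getNumberFromReversedString; infer_instance

-- ===== CLAIM (what is proved, stated in full; the proofs are below) =====
def Claim_equal_getNumberFromReversedString : Prop := ∀ (str : String), Dom_getNumberFromReversedString str → Spec_getNumberFromReversedString str (getNumberFromReversedString str)

-- ===== LEMMAS AND PROOFS =====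

-- the 20 search candidates (pattern as searched in the REVERSED string, value), in A's order
def pvCandA : List (List Char × List Char) :=
  pvNumbers.flatMap (fun kv => [(kv.1.reverse, kv.2), (kv.2, kv.2)])

-- the same candidates in B's per-pair order (digit first)
def pvCandB : List (List Char × List Char) :=
  pvNumbers.flatMap (fun kv => [(kv.2, kv.2), (kv.1.reverse, kv.2)])

-- A's per-candidate update
def pvCB (rstr : List Char) (st : Int × List Char) (c : List Char × List Char) : Int × List Char :=
  if PySem.Chars.isIn c.1 rstr then
    let t := PySem.Chars.find rstr c.1
    if t < st.1 then (t, c.2) else st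
  else st

lemma bodyA_eq (r : List Char) (st : Int × List Char) (kv : List Char × List Char) :
    pvBodyA r st kv = pvCB r (pvCB r st (kv.1.reverse, kv.2)) (kv.2, kv.2) := rfl

lemma foldA_eq (r : List Char) : ∀ (ps : List (List Char × List Char)) (st : Int × List Char),
    ps.foldl (pvBodyA r) st
      = (ps.flatMap (fun kv => [(kv.1.reverse, kv.2), (kv.2, kv.2)])).foldl (pvCB r) st := by
  intro ps
  induction ps with
  | nil => intro st; rfl
  | cons kv ps ih =>
    intro st
    simp only [List.foldl_cons, List.flatMap_cons, List.foldl_append, bodyA_eq]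
    exact ih _

-- "pattern q occurs in the reversed string starting at index i"
def pvMA (l : List Char) (i : Nat) (q : List Char) : Prop := q <+: l.reverse.drop i

-- Bool form, for use in if-conditions
def pvMAb (l : List Char) (i : Nat) (q : List Char) : Bool := q.isPrefixOf (l.reverse.drop i)

lemma pvMAb_iff {l : List Char} {i : Nat} {q : List Char} : pvMAb l i q = true ↔ pvMA l i q := by
  simp [pvMAb, pvMA, List.isPrefixOf_iff_prefix]

lemma isIn_of_MA {l : List Char} {i : Nat} {q : List Char} (h : pvMA l i q) :
    PySem.Chars.isIn q l.reverse = true := by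
  rw [PySem.Chars.isIn_iff_infix]
  exact (h.isInfix).trans (List.drop_suffix _ _).isInfix

lemma find_nonneg_of_isIn {l q : List Char} (h : PySem.Chars.isIn q l.reverse = true) :
    0 ≤ PySem.Chars.find l.reverse q := by
  rw [PySem.Chars.find_nonneg_iff]
  exact (PySem.Chars.isIn_iff_infix _ _).mp h

lemma MA_find {l q : List Char} (h : PySem.Chars.isIn q l.reverse = true) :
    pvMA l (PySem.Chars.find l.reverse q).toNat q :=
  (PySem.Chars.find_spec (find_nonneg_of_isIn h)).1

lemma find_le_of_MA {l : List Char} {i : Nat} {q : List Char} (h : pvMA l i q) :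
    PySem.Chars.find l.reverse q ≤ (i : Int) := by
  have hin := isIn_of_MA h
  have h0 := find_nonneg_of_isIn hin
  have hsp := (PySem.Chars.find_spec h0).2
  by_contra hlt
  push_neg at hlt
  exact hsp i (by omega) h

lemma find_lt_len {l q : List Char} (hq : q ≠ []) (h : PySem.Chars.isIn q l.reverse = true) :
    PySem.Chars.find l.reverse q < (l.length : Int) := by
  have hMA := MA_find h
  have h0 := find_nonneg_of_isIn h
  unfold pvMA at hMA
  rcases hMA with ⟨t, ht⟩
  have hne : l.reverse.drop (PySem.Chars.find l.reverse q).toNat ≠ [] := by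
    intro hnil; rw [hnil] at ht
    exact hq (List.append_eq_nil_iff.mp ht).1
  have := List.length_lt_of_drop_ne_nil hne
  simp only [List.length_reverse] at this
  omega

-- every candidate pattern is nonempty, and no candidate pattern is a prefix of another
lemma cand_ne_nil : ∀ c ∈ pvCandA, c.1 ≠ [] := by decide
lemma cand_pairwise :
    pvCandA.Pairwise (fun c c' => ¬(c.1 <+: c'.1) ∧ ¬(c'.1 <+: c.1)) := by decide

lemma mem_candA_iff_candB (c : List Char × List Char) : c ∈ pvCandA ↔ c ∈ pvCandB := by
  simp only [pvCandA, pvCandB, pvNumbers, List.flatMap_cons, List.flatMap_nil, List.mem_append,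
    List.mem_cons, List.not_mem_nil, List.mem_singleton, or_false, List.append_nil]
  tauto

-- at most one candidate matches at a given start index in the reversed string
lemma unique_MA {l : List Char} {i : Nat} {c c' : List Char × List Char}
    (hc : c ∈ pvCandA) (hc' : c' ∈ pvCandA) (h : pvMA l i c.1) (h' : pvMA l i c'.1) : c = c' := by
  by_contra hne
  have hp := List.prefix_or_prefix_of_prefix h h'
  have := cand_pairwise.forall (fun a b hab => ⟨hab.2, hab.1⟩) hc hc' hne
  tauto

-- ---- fold characterisation of A ----
lemma fold_spec (r : List Char) : ∀ (cs : List (List Char × List Char)) (st : Int × List Char),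
    (cs.foldl (pvCB r) st = st ∨
      ∃ c ∈ cs, PySem.Chars.isIn c.1 r = true ∧
        cs.foldl (pvCB r) st = (PySem.Chars.find r c.1, c.2))
    ∧ (cs.foldl (pvCB r) st).1 ≤ st.1
    ∧ ∀ c ∈ cs, PySem.Chars.isIn c.1 r = true →
        (cs.foldl (pvCB r) st).1 ≤ PySem.Chars.find r c.1 := by
  intro cs
  induction cs with
  | nil => intro st; exact ⟨Or.inl rfl, le_refl _, by simp⟩
  | cons c cs ih =>
    intro st
    simp only [List.foldl_cons]
    obtain ⟨ih1, ih2, ih3⟩ := ih (pvCB r st c)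
    have hstep : (PySem.Chars.isIn c.1 r = false ∧ pvCB r st c = st) ∨
        (PySem.Chars.isIn c.1 r = true ∧ pvCB r st c = (PySem.Chars.find r c.1, c.2)
          ∧ PySem.Chars.find r c.1 < st.1) ∨
        (PySem.Chars.isIn c.1 r = true ∧ pvCB r st c = st ∧ st.1 ≤ PySem.Chars.find r c.1) := by
      cases hin : PySem.Chars.isIn c.1 r with
      | false => exact Or.inl ⟨rfl, by unfold pvCB; simp [hin]⟩
      | true =>
        by_cases hlt : PySem.Chars.find r c.1 < st.1
        · exact Or.inr (Or.inl ⟨rfl, by unfold pvCB; simp [hin, hlt], hlt⟩)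
        · exact Or.inr (Or.inr ⟨rfl, by unfold pvCB; simp [hin, hlt], by omega⟩)
    have hle : (pvCB r st c).1 ≤ st.1 := by
      rcases hstep with ⟨_, h⟩ | ⟨_, h, hlt⟩ | ⟨_, h, _⟩ <;> simp [h] <;> omega
    refine ⟨?_, le_trans ih2 hle, ?_⟩
    · rcases ih1 with h | ⟨c', hc', hin, heq⟩
      · rcases hstep with ⟨_, hs⟩ | ⟨hin, hs, _⟩ | ⟨_, hs, _⟩
        · exact Or.inl (h.trans hs)
        · exact Or.inr ⟨c, List.mem_cons_self .., hin, h.trans hs⟩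
        · exact Or.inl (h.trans hs)
      · exact Or.inr ⟨c', List.mem_cons_of_mem _ hc', hin, heq⟩
    · intro c' hc' hin'
      rcases List.mem_cons.mp hc' with rfl | hmem
      · rcases hstep with ⟨hf, _⟩ | ⟨_, hs, _⟩ | ⟨_, hs, hge⟩
        · rw [hin'] at hf; cases hf
        · calc _ ≤ (pvCB r st c').1 := ih2
               _ = PySem.Chars.find r c'.1 := by rw [hs]
        · calc _ ≤ (pvCB r st c').1 := ih2
               _ = st.1 := by rw [hs]
               _ ≤ _ := hge
      · exact ih3 c' hmem hin'

-- ---- B's check at e, rephrased through pvMA ----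
lemma single_prefix_iff {d : Char} {x : List Char} : [d] <+: x ↔ x.head? = some d := by
  cases x with
  | nil => simp
  | cons a t => simp [List.cons_prefix_cons, eq_comm]

lemma digit_test_iff {l : List Char} {e : Nat} (he : e < l.length) (d : Char) :
    ([l.getD e ' '] = [d]) ↔ pvMAb l (l.length - 1 - e) [d] = true := by
  rw [pvMAb_iff]
  unfold pvMA
  rw [single_prefix_iff, List.head?_drop, List.getElem?_reverse (by omega)]
  have h1 : l.length - 1 - (l.length - 1 - e) = e := by omega
  rw [h1, List.getElem?_eq_getElem he]
  simp [List.getD_eq_getElem?_getD, List.getElem?_eq_getElem he]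

lemma word_test_iff {l : List Char} {e : Nat} (he : e < l.length) (key : List Char) :
    (0 ≤ (e : Int) - key.length + 1 ∧
      PySem.List.slice l (some ((e : Int) - key.length + 1)) (some ((e : Int) + 1)) = key)
      ↔ pvMAb l (l.length - 1 - e) key.reverse = true := by
  rw [pvMAb_iff]
  unfold pvMA
  rw [List.drop_reverse]
  have h1 : l.length - (l.length - 1 - e) = e + 1 := by omega
  rw [h1, List.reverse_prefix]
  by_cases hk : key.length ≤ e + 1
  · have hs0 : (0:Int) ≤ (e : Int) - key.length + 1 := by omega
    rw [PySem.List.slice_toNat _ hs0 (by omega)]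
    have h2 : ((e : Int) - key.length + 1).toNat = e + 1 - key.length := by omega
    have h3 : ((e : Int) + 1).toNat = e + 1 := by omega
    rw [h2, h3]
    have h4 : e + 1 - (e + 1 - key.length) = key.length := by omega
    rw [h4]
    have hlen : (l.take (e + 1)).length = e + 1 := by
      rw [List.length_take]; omega
    constructor
    · intro ⟨_, hsl⟩
      rw [List.suffix_iff_eq_drop, hlen, List.drop_take]
      have h5 : e + 1 - (e + 1 - key.length) = key.length := by omega
      rw [h5]
      exact hsl.symm
    · intro hsuf
      refine ⟨hs0, ?_⟩
      rw [List.suffix_iff_eq_drop, hlen, List.drop_take] at hsuf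
      have h5 : e + 1 - (e + 1 - key.length) = key.length := by omega
      rw [h5] at hsuf
      exact hsuf.symm
  · constructor
    · intro ⟨hs0, _⟩; omega
    · intro hsuf
      have := hsuf.length_le
      rw [List.length_take] at this
      omega

lemma checkPair_core (l : List Char) (e : Nat) (he : e < l.length) (key : List Char) (d : Char) :
    pvCheckPair l e (key, [d]) =
      if pvMAb l (l.length - 1 - e) [d] then some [d]
      else if pvMAb l (l.length - 1 - e) key.reverse then some [d]
      else none := by
  unfold pvCheckPair
  exact if_congr (digit_test_iff he d) rfl (if_congr (word_test_iff he key) rfl rfl)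

lemma checkPair_eq {l : List Char} {e : Nat} (he : e < l.length) (kv : List Char × List Char)
    (hkv : kv ∈ pvNumbers) :
    pvCheckPair l e kv =
      if pvMAb l (l.length - 1 - e) kv.2 then some kv.2
      else if pvMAb l (l.length - 1 - e) kv.1.reverse then some kv.2
      else none := by
  fin_cases hkv <;> exact checkPair_core l e he _ _

lemma findSome?_flatMap_aux (l : List Char) (e : Nat) :
    ∀ ps : List (List Char × List Char),
      (∀ kv ∈ ps, pvCheckPair l e kv =
        if pvMAb l (l.length - 1 - e) kv.2 then some kv.2
        else if pvMAb l (l.length - 1 - e) kv.1.reverse then some kv.2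
        else none) →
      ps.findSome? (pvCheckPair l e) =
        (ps.flatMap (fun kv => [(kv.2, kv.2), (kv.1.reverse, kv.2)])).findSome?
          (fun c => if pvMAb l (l.length - 1 - e) c.1 then some c.2 else none) := by
  intro ps
  induction ps with
  | nil => intro _; rfl
  | cons kv ps ih =>
    intro h
    rw [List.flatMap_cons, List.findSome?_append, List.findSome?_cons,
      h kv (List.mem_cons_self ..), List.findSome?_cons, List.findSome?_cons]
    simp only [List.findSome?_nil]
    split_ifs with h1 h2 <;>
      simp [ih (fun kv hkv => h kv (List.mem_cons_of_mem _ hkv))]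

lemma checkAt_eq {l : List Char} {e : Nat} (he : e < l.length) :
    pvCheckAt l e =
      pvCandB.findSome? (fun c => if pvMAb l (l.length - 1 - e) c.1 then some c.2 else none) := by
  unfold pvCheckAt pvCandB
  exact findSome?_flatMap_aux l e pvNumbers (fun kv hkv => checkPair_eq he kv hkv)

lemma findSome?_of_unique {α β : Type} (l : List α) (f : α → Option β) (a : α)
    (ha : a ∈ l) (hothers : ∀ b ∈ l, b ≠ a → f b = none) : l.findSome? f = f a := by
  induction l with
  | nil => cases ha
  | cons x t ih =>
    by_cases hx : x = a
    · subst hx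
      cases hfa : f x with
      | some v => simp [List.findSome?_cons, hfa]
      | none =>
        simp only [List.findSome?_cons, hfa]
        rw [List.findSome?_eq_none_iff.mpr]
        intro b hb
        by_cases hba : b = x
        · exact hba ▸ hfa
        · exact hothers b (List.mem_cons_of_mem _ hb) hba
    · have hfx : f x = none := hothers x (List.mem_cons_self ..) hx
      simp only [List.findSome?_cons, hfx]
      exact ih ((List.mem_cons.mp ha).resolve_left (fun h => hx h.symm)) (fun b hb => hothers b (List.mem_cons_of_mem _ hb))

lemma checkAt_none {l : List Char} {e : Nat} (he : e < l.length)
    (h : ∀ c ∈ pvCandA, ¬ pvMA l (l.length - 1 - e) c.1) : pvCheckAt l e = none := by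
  rw [checkAt_eq he, List.findSome?_eq_none_iff.mpr]
  intro c hc
  simp only [ite_eq_right_iff, pvMAb_iff]
  intro hb'
  exact absurd hb' (h c ((mem_candA_iff_candB c).mpr hc))

lemma checkAt_some {l : List Char} {e : Nat} {c : List Char × List Char} (he : e < l.length)
    (hc : c ∈ pvCandA) (h : pvMA l (l.length - 1 - e) c.1) : pvCheckAt l e = some c.2 := by
  rw [checkAt_eq he,
    findSome?_of_unique _ _ c ((mem_candA_iff_candB c).mp hc)
      (fun b hb hbc => by
        simp only [ite_eq_right_iff, pvMAb_iff]
        intro hb'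
        exact absurd (unique_MA ((mem_candA_iff_candB b).mpr hb) hc hb' h) hbc)]
  simp [pvMAb_iff.mpr h]

lemma scan_none {l : List Char}
    (h : ∀ (i : Nat) (c : _), c ∈ pvCandA → ¬ pvMA l i c.1) :
    ∀ m, m ≤ l.length → pvScan l m = [] := by
  intro m
  induction m with
  | zero => intro _; rfl
  | succ m ih =>
    intro hm
    have hnone := checkAt_none (l := l) (e := m) (by omega) (fun c hc => h _ c hc)
    simp only [pvScan, hnone]
    exact ih (by omega)

lemma scan_hit {l : List Char} {cstar : List Char × List Char} {i0 : Nat}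
    (hc : cstar ∈ pvCandA) (hMA : pvMA l i0 cstar.1) (hi0 : i0 < l.length)
    (hlow : ∀ (i : Nat), i < i0 → ∀ c ∈ pvCandA, ¬ pvMA l i c.1) :
    ∀ m, m ≤ l.length → l.length - m ≤ i0 → pvScan l m = cstar.2 := by
  intro m
  induction m with
  | zero => intro _ h0; omega
  | succ m ih =>
    intro hm hrange
    by_cases him : l.length - 1 - m = i0
    · have := checkAt_some (l := l) (e := m) (by omega) hc (him ▸ hMA)
      simp only [pvScan, this]
    · have hlt : l.length - 1 - m < i0 := by omega
      have hnone := checkAt_none (l := l) (e := m) (by omega)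
        (fun c hcmem => hlow _ hlt c hcmem)
      simp only [pvScan, hnone]
      exact ih (by omega) (by omega)

lemma final_list (l : List Char) :
    (pvNumbers.foldl (pvBodyA l.reverse) ((l.length : Int), [])).2 = pvScan l l.length := by
  rw [foldA_eq]
  have hcand : pvNumbers.flatMap
      (fun kv => [(kv.1.reverse, kv.2), (kv.2, kv.2)]) = pvCandA := rfl
  rw [hcand]
  obtain ⟨hdisj, hle, hmin⟩ := fold_spec l.reverse pvCandA ((l.length : Int), [])
  by_cases hP : ∃ c ∈ pvCandA, PySem.Chars.isIn c.1 l.reverse = true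
  · -- some candidate occurs: the fold picks the minimiser, the scan finds it from the right
    obtain ⟨c0, hc0, hin0⟩ := hP
    have hlt0 : PySem.Chars.find l.reverse c0.1 < (l.length : Int) :=
      find_lt_len (cand_ne_nil c0 hc0) hin0
    rcases hdisj with heq | ⟨cstar, hcs, hins, heq⟩
    · exfalso
      have := hmin c0 hc0 hin0
      rw [heq] at this
      simp at this
      omega
    · have h0 : 0 ≤ PySem.Chars.find l.reverse cstar.1 := find_nonneg_of_isIn hins
      have hMA0 : pvMA l (PySem.Chars.find l.reverse cstar.1).toNat cstar.1 := MA_find hins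
      have hi0n : (PySem.Chars.find l.reverse cstar.1).toNat < l.length := by
        have := find_lt_len (cand_ne_nil cstar hcs) hins
        omega
      have hlow : ∀ (i : Nat), i < (PySem.Chars.find l.reverse cstar.1).toNat →
          ∀ c ∈ pvCandA, ¬ pvMA l i c.1 := by
        intro i hi c hcmem hMAc
        have h1 : PySem.Chars.find l.reverse c.1 ≤ (i : Int) := find_le_of_MA hMAc
        have h2 := hmin c hcmem (isIn_of_MA hMAc)
        rw [heq] at h2
        simp at h2
        omega
      rw [heq]
      exact (scan_hit hcs hMA0 hi0n hlow l.length (le_refl _) (by omega)).symm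
  · -- no candidate occurs anywhere: the fold keeps (len, "") and the scan falls through
    have hres : pvCandA.foldl (pvCB l.reverse) ((l.length : Int), []) = ((l.length : Int), []) := by
      rcases hdisj with heq | ⟨c, hcmem, hin, _⟩
      · exact heq
      · exact absurd ⟨c, hcmem, hin⟩ hP
    rw [hres]
    exact (scan_none (fun i c hcmem hMAc =>
      hP ⟨c, hcmem, isIn_of_MA hMAc⟩) l.length (le_refl _)).symm

-- ===== VERDICT (by name: the statement is the Claim_ definition above) =====
theorem getNumberFromReversedString_spec : Claim_equal_getNumberFromReversedString := by
  intro str _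
  unfold Spec_getNumberFromReversedString getNumberFromReversedString getNumberFromReversedString_alt
  exact congrArg String.ofList (final_list str.toList)
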